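-- pv_equiv track=rewrite | github.com/felis2803/tables | src/steps/forced_bits.py | collect_forced_bits_bitwise
-- ===== SOURCE A (Python) =====
-- def collect_forced_bits_bitwise(tables: list[dict]) -> tuple[dict[int, int], int]:
--     forced: dict[int, int] = {}
--     occurrences = 0
--
--     for table in tables:
--         bits = table["bits"]
--         rows = table["rows"]
--         full_mask = (1 << len(bits)) - 1
--         and_mask = full_mask
--         or_mask = 0
--
--         for row in rows:
--             and_mask &= row
--             or_mask |= row
--
--         zero_mask = full_mask & ~or_mask
--         for offset, bit in enumerate(bits):
--             mask = 1 << offset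
--             if and_mask & mask:
--                 value = 1
--             elif zero_mask & mask:
--                 value = 0
--             else:
--                 continue
--
--             current = forced.get(bit)
--             if current is not None and current != value:
--                 raise RuntimeError(f"conflicting forced values for bit {bit}")
--
--             forced[bit] = value
--             occurrences += 1
--
--     return forced, occurrences
-- ===== SOURCE B (Python) =====
-- def collect_forced_bits_bitwise(tables: list[dict]) -> tuple[dict[int, int], int]:
--     def forced_value(rows, offset):
--         mask = 1 << offset
--         if all(row & mask for row in rows):
--             return 1
--         if all(not (row & mask) for row in rows):
--             return 0
--         return None
--
--     occurrences_list = [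
--         (bit, v)
--         for table in tables
--         for offset, bit in enumerate(table["bits"])
--         if (v := forced_value(table["rows"], offset)) is not None
--     ]
--
--     forced: dict[int, int] = {}
--     for bit, value in occurrences_list:
--         current = forced.get(bit)
--         if current is not None and current != value:
--             raise RuntimeError(f"conflicting forced values for bit {bit}")
--         forced[bit] = value
--
--     return forced, len(occurrences_list)
-- ===== Notes on version B (the rewrite author's own statement) =====
-- stated objective: alternative
-- what changed: B replaces A's single interleaved pass (AND/OR mask accumulation per table followed by in-place dict updates) with two separate stages: a comprehension that first builds the flat list of (bit, value) occurrences by scanning the rows per bit position, and then one merge loop that folds that list into the dict and takes the count as the list's length.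
import Mathlib
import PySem

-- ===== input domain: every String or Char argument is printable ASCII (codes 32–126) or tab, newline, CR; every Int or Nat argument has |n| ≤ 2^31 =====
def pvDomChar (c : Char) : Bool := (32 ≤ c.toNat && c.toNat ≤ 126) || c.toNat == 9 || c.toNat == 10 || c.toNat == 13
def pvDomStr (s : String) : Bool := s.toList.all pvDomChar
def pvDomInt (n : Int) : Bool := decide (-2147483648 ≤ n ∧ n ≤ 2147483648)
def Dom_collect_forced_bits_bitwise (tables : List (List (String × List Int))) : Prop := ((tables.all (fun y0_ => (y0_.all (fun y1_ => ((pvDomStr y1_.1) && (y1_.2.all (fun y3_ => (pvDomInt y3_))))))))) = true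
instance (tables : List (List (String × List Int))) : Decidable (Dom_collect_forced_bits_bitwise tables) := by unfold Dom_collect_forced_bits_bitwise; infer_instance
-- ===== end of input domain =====

-- B splits A's interleaved mask-accumulation pass into two stages: build the flat list of
-- (bit, value) occurrences by per-bit row scans, then merge it into the dict in one loop
-- (same results and same RuntimeError on conflicts; objective: alternative, not faster).


-- ===== PORT A =====
-- inner `for offset, bit in enumerate(bits)` loop of A; `none` = the RuntimeError raise
def pvBitsLoopA (and_mask zero_mask : Int) : List Int → Nat → PySem.Dict Int Int → Int → Option (PySem.Dict Int Int × Int)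
  | [], _, forced, occ => some (forced, occ)
  | b :: rest, off, forced, occ =>
    let mask : Int := (1 : Int) <<< off
    let v? : Option Int :=
      if PySem.Int.band and_mask mask ≠ 0 then some 1
      else if PySem.Int.band zero_mask mask ≠ 0 then some 0
      else none
    match v? with
    | none => pvBitsLoopA and_mask zero_mask rest (off + 1) forced occ
    | some v =>
      match PySem.Dict.get? forced b with
      | some c =>
        if c ≠ v then none
        else pvBitsLoopA and_mask zero_mask rest (off + 1) (forced.insert b v) (occ + 1)
      | none => pvBitsLoopA and_mask zero_mask rest (off + 1) (forced.insert b v) (occ + 1)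

-- one iteration of A's `for table in tables`; `none` = KeyError or RuntimeError
def pvTableA (st : PySem.Dict Int Int × Int) (table : List (String × List Int)) :
    Option (PySem.Dict Int Int × Int) :=
  match (PySem.Dict.mk table).get? "bits" with
  | none => none
  | some bits =>
    match (PySem.Dict.mk table).get? "rows" with
    | none => none
    | some rows =>
      let full_mask : Int := ((1 : Int) <<< bits.length) - 1
      let and_mask : Int := rows.foldl PySem.Int.band full_mask
      let or_mask : Int := rows.foldl PySem.Int.bor 0
      let zero_mask : Int := PySem.Int.band full_mask (Int.not or_mask)
      pvBitsLoopA and_mask zero_mask bits 0 st.1 st.2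

def pvTablesA : List (List (String × List Int)) → PySem.Dict Int Int × Int → Option (PySem.Dict Int Int × Int)
  | [], st => some st
  | t :: ts, st =>
    match pvTableA st t with
    | none => none
    | some st' => pvTablesA ts st'

def collect_forced_bits_bitwise (tables : List (List (String × List Int))) : (List (Int × Int)) × Int :=
  match pvTablesA tables (PySem.Dict.empty, 0) with
  | some (forced, occ) => (forced.items, occ)
  | none => ([], 0)

-- ===== PORT B =====
-- B's helper `forced_value(rows, offset)`
def pvForcedValue (rows : List Int) (offset : Nat) : Option Int :=
  let mask : Int := (1 : Int) <<< offset
  if rows.all (fun row => decide (PySem.Int.band row mask ≠ 0)) then some 1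
  else if rows.all (fun row => decide (PySem.Int.band row mask = 0)) then some 0
  else none

-- the inner generator `for offset, bit in enumerate(table["bits"]) if (v := forced_value(...)) is not None`
-- (`table["rows"]` is looked up inside forced_value, i.e. once per produced offset; none = KeyError)
def pvOccsBits (table : List (String × List Int)) : List Int → Nat → Option (List (Int × Int))
  | [], _ => some []
  | bit :: rest, offset =>
    match (PySem.Dict.mk table).get? "rows" with
    | none => none
    | some rows =>
      match pvOccsBits table rest (offset + 1) with
      | none => none
      | some tail =>
        match pvForcedValue rows offset with
        | some v => some ((bit, v) :: tail)
        | none => some tail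

-- stage 1: the whole `occurrences_list` comprehension; none = KeyError
def pvOccsList : List (List (String × List Int)) → Option (List (Int × Int))
  | [] => some []
  | t :: ts =>
    match (PySem.Dict.mk t).get? "bits" with
    | none => none
    | some bits =>
      match pvOccsBits t bits 0 with
      | none => none
      | some occs =>
        match pvOccsList ts with
        | none => none
        | some rest => some (occs ++ rest)

-- stage 2: the merge loop; none = the RuntimeError raise
def pvMerge : List (Int × Int) → PySem.Dict Int Int → Option (PySem.Dict Int Int)
  | [], forced => some forced
  | (bit, value) :: rest, forced =>
    match PySem.Dict.get? forced bit with
    | some current => if current ≠ value then none else pvMerge rest (forced.insert bit value)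
    | none => pvMerge rest (forced.insert bit value)

def collect_forced_bits_bitwise_alt (tables : List (List (String × List Int))) : (List (Int × Int)) × Int :=
  match pvOccsList tables with
  | none => ([], 0)
  | some occs =>
    match pvMerge occs PySem.Dict.empty with
    | some forced => (forced.items, (occs.length : Int))
    | none => ([], 0)

-- ===== PRECONDITION & SPEC =====
-- spec-level description of the forced value of bit position `o` across `rows` (Int.testBit is
-- Python's `(row >> o) & 1`; used only to state Pre_, never by the ports)
def pvForcedVal (rows : List Int) (o : Nat) : Option Int :=
  if rows.all (fun r => r.testBit o) then some 1
  else if rows.all (fun r => !r.testBit o) then some 0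
  else none

-- all (bit label, forced value) occurrences over all tables
def pvOccs (tables : List (List (String × List Int))) : List (Int × Int) :=
  tables.flatMap (fun t =>
    ((((PySem.Dict.mk t).get? "bits").getD []).zipIdx).filterMap
      (fun p => (pvForcedVal (((PySem.Dict.mk t).get? "rows").getD []) p.2).map (fun v => (p.1, v))))

-- Pre_ = exactly where the Python A returns normally: every table has the "bits" and "rows" keys
-- (else KeyError) and no bit label is forced to 1 in one place and to 0 in another (else RuntimeError).
def Pre_collect_forced_bits_bitwise (tables : List (List (String × List Int))) : Prop :=
  (tables.all (fun t => (((PySem.Dict.mk t).get? "bits").isSome && ((PySem.Dict.mk t).get? "rows").isSome)) = true)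
  ∧ ∀ p ∈ pvOccs tables, ∀ q ∈ pvOccs tables, p.1 = q.1 → p.2 = q.2
instance (tables : List (List (String × List Int))) : Decidable (Pre_collect_forced_bits_bitwise tables) := by
  unfold Pre_collect_forced_bits_bitwise; infer_instance

def pvWitness_collect_forced_bits_bitwise : (List (List (String × List Int))) :=
  [[("bits", [0, 1]), ("rows", [3, 1])]]

def Spec_collect_forced_bits_bitwise (tables : List (List (String × List Int))) (out : (List (Int × Int)) × Int) : Prop := out = collect_forced_bits_bitwise_alt tables
instance (tables : List (List (String × List Int))) (out : (List (Int × Int)) × Int) : Decidable (Spec_collect_forced_bits_bitwise tables out) := by unfold Spec_collect_forced_bits_bitwise; infer_instance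

-- ===== CLAIM (what is proved, stated in full; the proofs are below) =====
def Claim_equal_collect_forced_bits_bitwise : Prop := ∀ (tables : List (List (String × List Int))), Dom_collect_forced_bits_bitwise tables → Pre_collect_forced_bits_bitwise tables → Spec_collect_forced_bits_bitwise tables (collect_forced_bits_bitwise tables)

-- ===== LEMMAS AND PROOFS =====

theorem pv_and_add_ldiff (m : Nat) : ∀ n : Nat, (m &&& n) + Nat.ldiff m n = m := by
  induction m using Nat.binaryRec with
  | zero => intro n; simp [Nat.ldiff]
  | bit b m ih =>
    intro n
    rw [← n.bit_bodd_div2, Nat.land_bit, Nat.ldiff_bit]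
    simp only [Nat.bit_val]
    have := ih n.div2
    cases b <;> cases n.bodd <;> simp at * <;> omega

theorem pv_sub_and (m n : Nat) : m - (m &&& n) = Nat.ldiff m n := by
  have := pv_and_add_ldiff m n; omega

theorem pv_band_eq_land (a b : Int) : PySem.Int.band a b = Int.land a b := by
  cases a with
  | ofNat m =>
    cases b with
    | ofNat n => simp [PySem.Int.band, Int.land]
    | negSucc n => simp [PySem.Int.band, Int.land, pv_sub_and]
  | negSucc m =>
    cases b with
    | ofNat n => simp [PySem.Int.band, Int.land, pv_sub_and]
    | negSucc n => simp [PySem.Int.band, Int.land]; omega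

theorem pv_bor_eq_lor (a b : Int) : PySem.Int.bor a b = Int.lor a b := by
  cases a with
  | ofNat m =>
    cases b with
    | ofNat n => simp [PySem.Int.bor, Int.lor]
    | negSucc n => simp [PySem.Int.bor, Int.lor, pv_sub_and]; omega
  | negSucc m =>
    cases b with
    | ofNat n => simp [PySem.Int.bor, Int.lor, pv_sub_and]; omega
    | negSucc n => simp [PySem.Int.bor, Int.lor]; omega

theorem pv_not_eq_lnot (a : Int) : Int.not a = Int.lnot a := by
  cases a <;> rfl

theorem pv_mask_eq (o : Nat) : (1 : Int) <<< o = ((2 ^ o : Nat) : Int) := by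
  simp [Int.shiftLeft_eq]

theorem pv_ldiff_two_pow (m : Nat) (o : Nat) :
    Nat.ldiff (2 ^ o) m = (!(m.testBit o)).toNat * 2 ^ o := by
  apply Nat.eq_of_testBit_eq
  intro i
  by_cases hio : o = i
  · subst hio
    cases h : m.testBit o <;> simp [Nat.testBit_ldiff, h]
  · cases h : m.testBit o <;> simp [Nat.testBit_ldiff, hio]

theorem pv_band_mask (x : Int) (o : Nat) :
    PySem.Int.band x ((1 : Int) <<< o) = (((x.testBit o).toNat * 2 ^ o : Nat) : Int) := by
  rw [pv_mask_eq, pv_band_eq_land]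
  cases x with
  | ofNat m =>
    have : Int.land (Int.ofNat m) ((2 ^ o : Nat) : Int) = ((m &&& 2 ^ o : Nat) : Int) := rfl
    rw [this, Nat.and_two_pow]; rfl
  | negSucc m =>
    have : Int.land (Int.negSucc m) ((2 ^ o : Nat) : Int) = ((Nat.ldiff (2 ^ o) m : Nat) : Int) := rfl
    rw [this, pv_ldiff_two_pow]; rfl

theorem pv_band_mask_ne (x : Int) (o : Nat) :
    decide (PySem.Int.band x ((1 : Int) <<< o) ≠ 0) = x.testBit o := by
  rw [pv_band_mask]
  have hp : (0 : Nat) < 2 ^ o := Nat.two_pow_pos o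
  cases h : x.testBit o <;> simp

theorem pv_band_mask_eq0 (x : Int) (o : Nat) :
    decide (PySem.Int.band x ((1 : Int) <<< o) = 0) = !x.testBit o := by
  rw [pv_band_mask]
  have hp : (0 : Nat) < 2 ^ o := Nat.two_pow_pos o
  cases h : x.testBit o <;> simp

theorem pv_testBit_band (a b : Int) (k : Nat) :
    (PySem.Int.band a b).testBit k = (a.testBit k && b.testBit k) := by
  rw [pv_band_eq_land]; exact Int.testBit_land a b k

theorem pv_testBit_bor (a b : Int) (k : Nat) :
    (PySem.Int.bor a b).testBit k = (a.testBit k || b.testBit k) := by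
  rw [pv_bor_eq_lor]; exact Int.testBit_lor a b k

theorem pv_testBit_not (a : Int) (k : Nat) : (Int.not a).testBit k = !a.testBit k := by
  rw [pv_not_eq_lnot]; exact Int.testBit_lnot a k

theorem pv_testBit_foldl_band (o : Nat) :
    ∀ (rows : List Int) (init : Int),
      (rows.foldl PySem.Int.band init).testBit o = (init.testBit o && rows.all (fun r => r.testBit o))
  | [], init => by simp
  | r :: rs, init => by
    simp only [List.foldl_cons, List.all_cons, pv_testBit_foldl_band o rs, pv_testBit_band]
    cases init.testBit o <;> cases r.testBit o <;> simp

theorem pv_testBit_foldl_bor (o : Nat) :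
    ∀ (rows : List Int) (init : Int),
      (rows.foldl PySem.Int.bor init).testBit o = (init.testBit o || rows.any (fun r => r.testBit o))
  | [], init => by simp
  | r :: rs, init => by
    simp only [List.foldl_cons, List.any_cons, pv_testBit_foldl_bor o rs, pv_testBit_bor]
    cases init.testBit o <;> cases r.testBit o <;> simp

theorem pv_fullmask_testBit (n o : Nat) (h : o < n) :
    (((1 : Int) <<< n) - 1).testBit o = true := by
  rw [pv_mask_eq]
  have h1 : (1 : Nat) ≤ 2 ^ n := Nat.one_le_two_pow
  have : ((2 ^ n : Nat) : Int) - 1 = ((2 ^ n - 1 : Nat) : Int) := by omega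
  rw [this]
  show (2 ^ n - 1 : Nat).testBit o = true
  simp [Nat.testBit_two_pow_sub_one, h]

-- the two branch conditions of A's inner loop coincide with B's per-bit row scans
theorem pv_cond1_eq (rows : List Int) (n off : Nat) (h : off < n) :
    decide (PySem.Int.band (rows.foldl PySem.Int.band (((1 : Int) <<< n) - 1)) ((1 : Int) <<< off) ≠ 0)
      = rows.all (fun r => decide (PySem.Int.band r ((1 : Int) <<< off) ≠ 0)) := by
  rw [pv_band_mask_ne, pv_testBit_foldl_band, pv_fullmask_testBit n off h]
  simp only [pv_band_mask_ne, Bool.true_and]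

theorem pv_cond0_eq (rows : List Int) (n off : Nat) (h : off < n) :
    decide (PySem.Int.band
        (PySem.Int.band (((1 : Int) <<< n) - 1) (Int.not (rows.foldl PySem.Int.bor 0)))
        ((1 : Int) <<< off) ≠ 0)
      = rows.all (fun r => decide (PySem.Int.band r ((1 : Int) <<< off) = 0)) := by
  rw [pv_band_mask_ne, pv_testBit_band, pv_fullmask_testBit n off h, pv_testBit_not,
    pv_testBit_foldl_bor]
  have h0 : (0 : Int).testBit off = false := by
    show (0 : Nat).testBit off = false
    exact Nat.zero_testBit off
  rw [h0]
  simp only [pv_band_mask_eq0, Bool.true_and, Bool.false_or, List.all_eq_not_any_not,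
    Bool.not_not]

-- proof-side pure version of stage 1 restricted to one table (rows already looked up)
def pvOccsFrom (rows : List Int) : List Int → Nat → List (Int × Int)
  | [], _ => []
  | b :: rest, off =>
    match pvForcedValue rows off with
    | some v => (b, v) :: pvOccsFrom rows rest (off + 1)
    | none => pvOccsFrom rows rest (off + 1)

theorem pv_occsBits_eq (t : List (String × List Int)) (rows : List Int)
    (hr : (PySem.Dict.mk t).get? "rows" = some rows) :
    ∀ (bits : List Int) (off : Nat), pvOccsBits t bits off = some (pvOccsFrom rows bits off)
  | [], _ => rfl
  | b :: rest, off => by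
    simp only [pvOccsBits, hr, pv_occsBits_eq t rows hr rest (off + 1), pvOccsFrom]
    cases pvForcedValue rows off <;> rfl

-- A's interleaved inner loop = merging the occurrence list of this table
theorem pv_loopA_char (rows : List Int) (n : Nat) :
    ∀ (bits : List Int) (off : Nat) (forced : PySem.Dict Int Int) (occ : Int),
      off + bits.length ≤ n →
      pvBitsLoopA (rows.foldl PySem.Int.band (((1 : Int) <<< n) - 1))
          (PySem.Int.band (((1 : Int) <<< n) - 1) (Int.not (rows.foldl PySem.Int.bor 0)))
          bits off forced occ
        = (pvMerge (pvOccsFrom rows bits off) forced).map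
            (fun f => (f, occ + ((pvOccsFrom rows bits off).length : Int)))
  | [], off, forced, occ, _ => by simp [pvBitsLoopA, pvOccsFrom, pvMerge]
  | b :: rest, off, forced, occ, h => by
    have hoff : off < n := by simp at h; omega
    have hrec : off + 1 + rest.length ≤ n := by simp at h; omega
    have ih := fun f o => pv_loopA_char rows n rest (off + 1) f o hrec
    simp only [pvBitsLoopA, pvOccsFrom, pvForcedValue]
    have h1 := pv_cond1_eq rows n off hoff
    have h0 := pv_cond0_eq rows n off hoff
    have i1 : (PySem.Int.band (rows.foldl PySem.Int.band (((1 : Int) <<< n) - 1)) ((1 : Int) <<< off) ≠ 0)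
        ↔ (rows.all (fun r => decide (PySem.Int.band r ((1 : Int) <<< off) ≠ 0)) = true) :=
      ⟨fun hp => h1 ▸ decide_eq_true hp, fun hb => of_decide_eq_true (h1.trans hb)⟩
    have i0 : (PySem.Int.band (PySem.Int.band (((1 : Int) <<< n) - 1) (Int.not (rows.foldl PySem.Int.bor 0))) ((1 : Int) <<< off) ≠ 0)
        ↔ (rows.all (fun r => decide (PySem.Int.band r ((1 : Int) <<< off) = 0)) = true) :=
      ⟨fun hp => h0 ▸ decide_eq_true hp, fun hb => of_decide_eq_true (h0.trans hb)⟩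
    simp only [i1, i0]
    split_ifs with hc1 hc0
    case _ =>
      simp only [pvMerge]
      cases PySem.Dict.get? forced b with
      | some c =>
        dsimp only
        split_ifs with hne
        · rfl
        · rw [ih]
          cases pvMerge (pvOccsFrom rows rest (off + 1)) (forced.insert b 1) with
          | none => rfl
          | some f => simp [Option.map]; ring
      | none =>
        dsimp only
        rw [ih]
        cases pvMerge (pvOccsFrom rows rest (off + 1)) (forced.insert b 1) with
        | none => rfl
        | some f => simp [Option.map]; ring
    case _ =>
      simp only [pvMerge]
      cases PySem.Dict.get? forced b with
      | some c =>
        dsimp only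
        split_ifs with hne
        · rfl
        · rw [ih]
          cases pvMerge (pvOccsFrom rows rest (off + 1)) (forced.insert b 0) with
          | none => rfl
          | some f => simp [Option.map]; ring
      | none =>
        dsimp only
        rw [ih]
        cases pvMerge (pvOccsFrom rows rest (off + 1)) (forced.insert b 0) with
        | none => rfl
        | some f => simp [Option.map]; ring
    case _ => exact ih _ _

theorem pv_merge_append (xs ys : List (Int × Int)) :
    ∀ forced, pvMerge (xs ++ ys) forced = (pvMerge xs forced).bind (fun f => pvMerge ys f) := by
  induction xs with
  | nil => intro forced; rfl
  | cons p rest ih =>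
    intro forced
    obtain ⟨b, v⟩ := p
    simp only [List.cons_append, pvMerge]
    cases PySem.Dict.get? forced b with
    | some c =>
      dsimp only
      split_ifs with hne
      · rfl
      · exact ih _
    | none => exact ih _

-- A's whole table loop = merging the full occurrence list
theorem pv_tablesA_char :
    ∀ (ts : List (List (String × List Int))),
      (ts.all (fun t => (((PySem.Dict.mk t).get? "bits").isSome && ((PySem.Dict.mk t).get? "rows").isSome)) = true) →
      ∀ (forced : PySem.Dict Int Int) (occ : Int),
        ∃ occs, pvOccsList ts = some occs ∧
          pvTablesA ts (forced, occ)
            = (pvMerge occs forced).map (fun f => (f, occ + (occs.length : Int)))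
  | [], _, forced, occ => ⟨[], rfl, by simp [pvTablesA, pvMerge]⟩
  | t :: ts, hkeys, forced, occ => by
    simp only [List.all_cons, Bool.and_eq_true] at hkeys
    obtain ⟨⟨hb, hr⟩, hts⟩ := hkeys
    obtain ⟨bits, hb⟩ := Option.isSome_iff_exists.mp hb
    obtain ⟨rows, hr⟩ := Option.isSome_iff_exists.mp hr
    obtain ⟨occs, hoccs, _⟩ := pv_tablesA_char ts hts forced occ
    refine ⟨pvOccsFrom rows bits 0 ++ occs, ?_, ?_⟩
    · simp [pvOccsList, hb, pv_occsBits_eq t rows hr bits 0, hoccs]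
    · simp only [pvTablesA, pvTableA, hb, hr]
      rw [pv_loopA_char rows bits.length bits 0 forced occ (by simp)]
      rw [pv_merge_append]
      cases hm : pvMerge (pvOccsFrom rows bits 0) forced with
      | none => rfl
      | some f =>
        simp only [Option.map_some, Option.bind_some]
        obtain ⟨occs', hoccs', hchar'⟩ :=
          pv_tablesA_char ts hts f (occ + ((pvOccsFrom rows bits 0).length : Int))
        rw [hoccs] at hoccs'
        cases hoccs'
        rw [hchar']
        cases pvMerge occs f with
        | none => rfl
        | some g => simp [Option.map]; ring

-- ===== VERDICT (by name: the statement is the Claim_ definition above) =====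
theorem collect_forced_bits_bitwise_spec : Claim_equal_collect_forced_bits_bitwise := by
  intro tables _ hpre
  obtain ⟨hkeys, _⟩ := hpre
  unfold Spec_collect_forced_bits_bitwise collect_forced_bits_bitwise collect_forced_bits_bitwise_alt
  obtain ⟨occs, hoccs, hchar⟩ := pv_tablesA_char tables hkeys PySem.Dict.empty 0
  rw [hoccs, hchar]
  cases hm : pvMerge occs PySem.Dict.empty <;> simp [hm]
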